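-- pv_equiv track=rewrite | github.com/johnhuh619/Baekjoon | 백준/Gold/3663. 고득점/고득점.py | solution
-- ===== SOURCE A (Python) =====
-- def solution(name):
--     up_down_cnt = sum(min(ord(c) - ord('A'), ord('Z') - ord(c) + 1) for c in name)
--     n = len(name)
--     min_move = n - 1
--     for i in range(n):
--         next_idx = i + 1
--         while next_idx < n and name[next_idx] == 'A':
--             next_idx += 1
--         min_move = min(min_move, i*2 + n - next_idx, i + 2 * (n - next_idx))
--     return up_down_cnt + min_move
-- ===== SOURCE B (Python) =====
-- def solution(name):
--     n = len(name)
--     up_down_cnt = sum(min(ord(c) - ord('A'), ord('Z') - ord(c) + 1) for c in name)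
--     best = n - 1
--     nxt = n  # next non-'A' index strictly after the current position
--     for i in range(n - 1, -1, -1):
--         best = min(best, 2 * i + n - nxt, i + 2 * (n - nxt))
--         if name[i] != 'A':
--             nxt = i
--     return up_down_cnt + best
-- ===== Notes on version B (the rewrite author's own statement) =====
-- stated objective: alternative
-- what changed: Replaced the per-position inner while-scan for the next non-'A' character by a single right-to-left pass that maintains that index incrementally, so B is one loop with no inner scan.
import Mathlib
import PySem

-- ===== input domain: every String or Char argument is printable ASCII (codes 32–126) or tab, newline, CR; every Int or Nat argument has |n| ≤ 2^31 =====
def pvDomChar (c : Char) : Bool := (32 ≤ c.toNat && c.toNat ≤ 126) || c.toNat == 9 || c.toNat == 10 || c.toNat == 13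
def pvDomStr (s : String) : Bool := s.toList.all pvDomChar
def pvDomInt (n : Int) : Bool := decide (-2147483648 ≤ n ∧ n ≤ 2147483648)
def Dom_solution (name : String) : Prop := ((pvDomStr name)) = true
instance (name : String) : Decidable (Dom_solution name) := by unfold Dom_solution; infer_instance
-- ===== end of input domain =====

-- B replaces A's per-position inner while-scan for the next non-'A' index by a single
-- right-to-left pass that maintains that index incrementally (alternative algorithm).

-- ===== PORT A =====
-- the inner `while next_idx < n and name[next_idx] == 'A': next_idx += 1` loop
def pvWhileA (cs : List Char) (i : Nat) : Nat :=
  if h : i < cs.length ∧ cs.getD i ' ' = 'A' then pvWhileA cs (i + 1) else i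
termination_by cs.length - i
decreasing_by omega

def solution (name : String) : Int :=
  let cs := name.toList
  let upDownCnt := (cs.map fun c => min ((c.toNat : Int) - 65) (90 - (c.toNat : Int) + 1)).sum
  let n := cs.length
  let minMove := (List.range n).foldl
    (fun m (i : Nat) =>
      let nx := pvWhileA cs (i + 1)
      min m (min ((i : Int) * 2 + (n : Int) - (nx : Int)) ((i : Int) + 2 * ((n : Int) - (nx : Int)))))
    ((n : Int) - 1)
  upDownCnt + minMove

-- ===== PORT B =====
def solution_alt (name : String) : Int :=
  let cs := name.toList
  let n := cs.length
  let upDownCnt := (cs.map fun c => min ((c.toNat : Int) - 65) (90 - (c.toNat : Int) + 1)).sum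
  -- for i in range(n-1, -1, -1), carrying (best, nxt)
  let st := (List.range n).reverse.foldl
    (fun (s : Int × Nat) (i : Nat) =>
      (min s.1 (min (2 * (i : Int) + (n : Int) - (s.2 : Int)) ((i : Int) + 2 * ((n : Int) - (s.2 : Int)))),
       if cs.getD i ' ' ≠ 'A' then i else s.2))
    ((n : Int) - 1, n)
  upDownCnt + st.1

-- ===== PRECONDITION & SPEC =====
def Spec_solution (name : String) (out : Int) : Prop := out = solution_alt name
instance (name : String) (out : Int) : Decidable (Spec_solution name out) := by unfold Spec_solution; infer_instance

-- ===== CLAIM (what is proved, stated in full; the proofs are below) =====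
def Claim_equal_solution : Prop := ∀ (name : String), Dom_solution name → Spec_solution name (solution name)

-- ===== LEMMAS AND PROOFS =====

-- one unfolding step of the while loop, for indices in range
theorem pvWhileA_step (cs : List Char) (i : Nat) (h : i < cs.length) :
    pvWhileA cs i = if cs.getD i ' ' = 'A' then pvWhileA cs (i + 1) else i := by
  rw [pvWhileA]
  by_cases hc : cs.getD i ' ' = 'A' <;> simp [h, hc]

theorem pvWhileA_end (cs : List Char) : pvWhileA cs cs.length = cs.length := by
  rw [pvWhileA]; simp

-- the body of A's fold, with `nx` abbreviated
def pvG (cs : List Char) (i : Nat) : Int :=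
  let n := cs.length
  let nx := pvWhileA cs (i + 1)
  min ((i : Int) * 2 + (n : Int) - (nx : Int)) ((i : Int) + 2 * ((n : Int) - (nx : Int)))

-- B's descending fold, started with nxt = pvWhileA cs k, computes A's min-fold over range k
theorem pvB_fold (cs : List Char) (k : Nat) (hk : k ≤ cs.length) (a : Int) :
    ((List.range k).reverse.foldl
      (fun (s : Int × Nat) (i : Nat) =>
        (min s.1 (min (2 * (i : Int) + (cs.length : Int) - (s.2 : Int))
             ((i : Int) + 2 * ((cs.length : Int) - (s.2 : Int)))),
         if cs.getD i ' ' ≠ 'A' then i else s.2))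
      (a, pvWhileA cs k)).1
    = (List.range k).foldl (fun m (i : Nat) => min m (pvG cs i)) a := by
  induction k generalizing a with
  | zero => simp
  | succ k ih =>
    have hk' : k ≤ cs.length := Nat.le_of_succ_le hk
    rw [List.range_succ, List.reverse_append]
    simp only [List.reverse_singleton, List.singleton_append, List.foldl_cons]
    have hW : (if cs.getD k ' ' ≠ 'A' then k else pvWhileA cs (k + 1)) = pvWhileA cs k := by
      rw [pvWhileA_step cs k (by omega)]
      by_cases hc : cs.getD k ' ' = 'A'
      · simp [hc]
      · simp [hc]
    rw [hW, ih hk']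
    -- both sides are min-folds; commute the first element to the end
    have comm : ∀ (l : List Nat) (b : Int) (x : Int),
        l.foldl (fun m (i : Nat) => min m (pvG cs i)) (min b x)
          = min (l.foldl (fun m (i : Nat) => min m (pvG cs i)) b) x := by
      intro l
      induction l with
      | nil => intro b x; simp
      | cons y t iht =>
        intro b x
        simp only [List.foldl_cons]
        rw [show min (min b x) (pvG cs y) = min (min b (pvG cs y)) x by
              rw [min_assoc, min_comm x, ← min_assoc], iht]
    rw [List.foldl_append]
    simp only [List.foldl_cons, List.foldl_nil]
    rw [comm]
    simp only [pvG]
    ring_nf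

-- ===== VERDICT (by name: the statement is the Claim_ definition above) =====
theorem solution_spec : Claim_equal_solution := by
  intro name _
  unfold Spec_solution solution solution_alt
  simp only []
  set cs := name.toList with hcs
  have h := pvB_fold cs cs.length le_rfl ((cs.length : Int) - 1)
  rw [pvWhileA_end] at h
  rw [h]
  rfl
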